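-- pv_equiv track=rewrite | github.com/iankona/bpfile-v5 | 文件/havok/havokbinary.py | havok_int_from_uint8
-- ===== SOURCE A (Python) =====
-- def havok_int_from_uint8(auint8):
--     result = 0
--     for i, uint8 in enumerate(auint8):
--         if i == 0:
--             value = (uint8 & 0b01111110) >> 1
--             minus = (uint8 & 0b00000001)
--             result += value
--         if i == 1:
--             value = int(uint8 & 0b01111111)
--             result += value * 64
--         if i == 2:
--             value = int(uint8 & 0b01111111)
--             result += value * 64 * 128
--         if i == 3:
--             value = int(uint8 & 0b01111111)
--             result += value * 64 * 128 * 128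
--         if i == 4:
--             value = int(uint8 & 0b01111111)
--             result += value * 64 * 128 * 128 * 128
--         if i == 5:
--             value = int(uint8 & 0b01111111)
--             result += value * 64 * 128 * 128 * 128 * 128
--         if i == 6:
--             value = int(uint8 & 0b01111111)
--             result += value * 64 * 128 * 128 * 128 * 128 * 128
--         if i == 7:
--             value = int(uint8 & 0b01111111)
--             result += value * 64 * 128 * 128 * 128 * 128 * 128 * 128
--         if i == 8:
--             value = int(uint8 & 0b01111111)
--             result += value * 64 * 128 * 128 * 128 * 128 * 128 * 128 * 128
--         if i == 9:
--             value = int(uint8 & 0b01111111)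
--             result += value * 64 * 128 * 128 * 128 * 128 * 128 * 128 * 128 * 128
--         if i == 10:
--             value = int(uint8 & 0b01111111)
--             result += value * 64 * 128 * 128 * 128 * 128 * 128 * 128 * 128 * 128 * 128
--         if i == 11:
--             value = int(uint8 & 0b01111111)
--             result += value * 64 * 128 * 128 * 128 * 128 * 128 * 128 * 128 * 128 * 128 * 128
--
--     if minus == 1: result = -result
--     return result
-- ===== SOURCE B (Python) =====
-- def havok_int_from_uint8(auint8):
--     b0 = auint8[0]
--     sign = b0 & 1
--     acc = 0
--     for b in reversed(auint8[1:12]):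
--         acc = acc * 128 + (b & 0x7F)
--     result = ((b0 & 0x7E) >> 1) + acc * 64
--     return -result if sign == 1 else result
-- ===== Notes on version B (the rewrite author's own statement) =====
-- stated objective: faster
-- what changed: Replaces A's full-list enumerate loop with 12 hard-coded weight branches by slicing the relevant bytes auint8[1:12] and folding them MSB-first with Horner's rule (acc = acc*128 + (b & 0x7F)), so only the first 12 bytes are ever touched.
import Mathlib
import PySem

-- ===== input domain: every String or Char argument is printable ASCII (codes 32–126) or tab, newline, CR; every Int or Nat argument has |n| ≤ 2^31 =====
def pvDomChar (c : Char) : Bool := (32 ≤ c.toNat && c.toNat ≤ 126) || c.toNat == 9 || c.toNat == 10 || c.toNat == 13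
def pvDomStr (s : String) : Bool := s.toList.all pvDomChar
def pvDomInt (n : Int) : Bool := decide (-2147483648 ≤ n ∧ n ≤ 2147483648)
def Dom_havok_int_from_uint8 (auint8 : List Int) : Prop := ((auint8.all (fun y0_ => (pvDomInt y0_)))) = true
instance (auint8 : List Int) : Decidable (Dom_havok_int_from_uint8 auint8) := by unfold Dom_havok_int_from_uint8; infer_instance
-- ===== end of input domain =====

-- B replaces A's 12 hard-coded if-branches with per-position weight literals by a reverse (MSB-first)
-- Horner fold over the slice auint8[1:12]; on long inputs B only touches the first 12 bytes where A scans all.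

-- ===== PORT A =====
-- A's enumerate loop: index i and the two mutable variables result, minus
-- (minus starts as 0 here; Python A leaves it unbound, so the empty list — where that matters — is outside Pre_).
def havokLoopA (i : Nat) (result minus : Int) (l : List Int) : Int × Int :=
  match l with
  | [] => (result, minus)
  | u :: rest =>
    let result := if i = 0 then result + ((PySem.Int.band u 126) >>> 1) else result
    let minus := if i = 0 then PySem.Int.band u 1 else minus
    let result := if i = 1 then result + (PySem.Int.band u 127) * 64 else result
    let result := if i = 2 then result + (PySem.Int.band u 127) * 64 * 128 else result
    let result := if i = 3 then result + (PySem.Int.band u 127) * 64 * 128 * 128 else result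
    let result := if i = 4 then result + (PySem.Int.band u 127) * 64 * 128 * 128 * 128 else result
    let result := if i = 5 then result + (PySem.Int.band u 127) * 64 * 128 * 128 * 128 * 128 else result
    let result := if i = 6 then result + (PySem.Int.band u 127) * 64 * 128 * 128 * 128 * 128 * 128 else result
    let result := if i = 7 then result + (PySem.Int.band u 127) * 64 * 128 * 128 * 128 * 128 * 128 * 128 else result
    let result := if i = 8 then result + (PySem.Int.band u 127) * 64 * 128 * 128 * 128 * 128 * 128 * 128 * 128 else result
    let result := if i = 9 then result + (PySem.Int.band u 127) * 64 * 128 * 128 * 128 * 128 * 128 * 128 * 128 * 128 else result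
    let result := if i = 10 then result + (PySem.Int.band u 127) * 64 * 128 * 128 * 128 * 128 * 128 * 128 * 128 * 128 * 128 else result
    let result := if i = 11 then result + (PySem.Int.band u 127) * 64 * 128 * 128 * 128 * 128 * 128 * 128 * 128 * 128 * 128 * 128 else result
    havokLoopA (i+1) result minus rest

def havok_int_from_uint8 (auint8 : List Int) : Int :=
  let st := havokLoopA 0 0 0 auint8
  if st.2 = 1 then -st.1 else st.1

-- ===== PORT B =====
-- reversed(...) + accumulator loop from Source B
def havokHorner (xs : List Int) : Int :=
  xs.reverse.foldl (fun acc b => acc * 128 + (PySem.Int.band b 127)) 0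

def havok_int_from_uint8_alt (auint8 : List Int) : Int :=
  match auint8 with
  | [] => 0  -- Python B raises IndexError here (auint8[0]); outside Pre_
  | b0 :: _ =>
    let sign := PySem.Int.band b0 1
    let acc := havokHorner (PySem.List.slice auint8 (some 1) (some 12))
    let result := ((PySem.Int.band b0 126) >>> 1) + acc * 64
    if sign = 1 then -result else result

-- ===== PRECONDITION & SPEC =====
-- Pre_ excludes only the empty list, on which A raises UnboundLocalError (and B raises IndexError).
def Pre_havok_int_from_uint8 (auint8 : List Int) : Prop := auint8 ≠ []
instance (auint8 : List Int) : Decidable (Pre_havok_int_from_uint8 auint8) := by unfold Pre_havok_int_from_uint8; infer_instance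
def pvWitness_havok_int_from_uint8 : List Int := [131, 5, 7]

def Spec_havok_int_from_uint8 (auint8 : List Int) (out : Int) : Prop := out = havok_int_from_uint8_alt auint8
instance (auint8 : List Int) (out : Int) : Decidable (Spec_havok_int_from_uint8 auint8 out) := by unfold Spec_havok_int_from_uint8; infer_instance

-- ===== CLAIM (what is proved, stated in full; the proofs are below) =====
def Claim_equal_havok_int_from_uint8 : Prop := ∀ (auint8 : List Int), Dom_havok_int_from_uint8 auint8 → Pre_havok_int_from_uint8 auint8 → Spec_havok_int_from_uint8 auint8 (havok_int_from_uint8 auint8)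

-- ===== LEMMAS AND PROOFS =====

theorem havokLoopA_ge12 (l : List Int) : ∀ (i : Nat) (r m : Int), 12 ≤ i → havokLoopA i r m l = (r, m) := by
  induction l with
  | nil => intro i r m h; simp [havokLoopA]
  | cons u rest ih =>
    intro i r m h
    simp only [havokLoopA]
    rw [if_neg (by omega), if_neg (by omega), if_neg (by omega), if_neg (by omega),
        if_neg (by omega), if_neg (by omega), if_neg (by omega), if_neg (by omega),
        if_neg (by omega), if_neg (by omega), if_neg (by omega), if_neg (by omega),
        if_neg (by omega)]
    exact ih (i+1) r m (by omega)

theorem havokHorner_cons (x : Int) (xs : List Int) :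
    havokHorner (x :: xs) = havokHorner xs * 128 + PySem.Int.band x 127 := by
  simp [havokHorner, List.foldl_append]

theorem havokLoopA_from (l : List Int) : ∀ (k : Nat) (r m : Int),
    havokLoopA (k + 1) r m l = (r + (64 * 128 ^ k) * havokHorner (l.take (11 - k)), m) := by
  induction l with
  | nil => intro k r m; simp [havokLoopA, havokHorner]
  | cons u rest ih =>
    intro k r m
    by_cases h11 : 11 ≤ k
    · rw [havokLoopA_ge12 _ (k + 1) r m (by omega)]
      simp [Nat.sub_eq_zero_of_le h11, havokHorner]
    · interval_cases k <;> (simp [havokLoopA, ih, havokHorner_cons]; ring)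

-- ===== VERDICT (by name: the statement is the Claim_ definition above) =====
theorem havok_int_from_uint8_spec : Claim_equal_havok_int_from_uint8 := by
  intro auint8 _ hpre
  unfold Spec_havok_int_from_uint8
  obtain _ | ⟨b0, rest⟩ := auint8
  · exact absurd rfl hpre
  · show (let st := havokLoopA 0 0 0 (b0 :: rest); if st.2 = 1 then -st.1 else st.1) = _
    simp only [havokLoopA, reduceIte, havok_int_from_uint8_alt]
    rw [havokLoopA_from rest 0]
    rw [show PySem.List.slice (b0 :: rest) (some 1) (some 12) = rest.take 11 from by
      simpa using PySem.List.slice_natCast (b0 :: rest) 1 12]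
    simp only []
    rcases eq_or_ne (PySem.Int.band b0 1) 1 with h | h <;> simp [h] <;> ring
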